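-- pv_equiv track=rewrite | github.com/rhpds/showroom-tool | src/showroom_tool/showroom.py | extract_module_name_from_content
-- ===== SOURCE A (Python) =====
-- def extract_module_name_from_content(content: str) -> str:
--     """Extract module name from AsciiDoc content headers."""
--     lines = content.split("\n")
--
--     # Try to find level 1 header (= Title)
--     for line in lines:
--         line = line.strip()
--         if line.startswith("= ") and len(line) > 2:
--             return line[2:].strip()
--
--     # Try to find level 1 underline-style header
--     for i, line in enumerate(lines):
--         if i < len(lines) - 1:
--             line = line.strip()
--             next_line = lines[i + 1].strip()
--             if line and next_line and all(c == "=" for c in next_line):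
--                 return line
--
--     # Fallback to level 2 header (== Title)
--     for line in lines:
--         line = line.strip()
--         if line.startswith("== ") and len(line) > 3:
--             return line[3:].strip()
--
--     # Fallback to level 2 underline-style header
--     for i, line in enumerate(lines):
--         if i < len(lines) - 1:
--             line = line.strip()
--             next_line = lines[i + 1].strip()
--             if line and next_line and all(c == "-" for c in next_line):
--                 return line
--
--     return ""
-- ===== SOURCE B (Python) =====
-- def extract_module_name_from_content(content: str) -> str:
--     """Extract module name from AsciiDoc content headers (single pass)."""
--     lines = content.split("\n")
--     c1 = c2 = c3 = c4 = None
--     for i, raw in enumerate(lines):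
--         line = raw.strip()
--         if c1 is None and line.startswith("= ") and len(line) > 2:
--             c1 = line[2:].strip()
--         if c3 is None and line.startswith("== ") and len(line) > 3:
--             c3 = line[3:].strip()
--         if i + 1 < len(lines):
--             nxt = lines[i + 1].strip()
--             if c2 is None and line and nxt and all(ch == "=" for ch in nxt):
--                 c2 = line
--             if c4 is None and line and nxt and all(ch == "-" for ch in nxt):
--                 c4 = line
--     for cand in (c1, c2, c3, c4):
--         if cand is not None:
--             return cand
--     return ""
-- ===== Notes on version B (the rewrite author's own statement) =====
-- stated objective: alternative
-- what changed: Replaced A's four sequential full scans with early returns by a single pass that records the first candidate of each of the four header categories, followed by a priority selection.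
import Mathlib
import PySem

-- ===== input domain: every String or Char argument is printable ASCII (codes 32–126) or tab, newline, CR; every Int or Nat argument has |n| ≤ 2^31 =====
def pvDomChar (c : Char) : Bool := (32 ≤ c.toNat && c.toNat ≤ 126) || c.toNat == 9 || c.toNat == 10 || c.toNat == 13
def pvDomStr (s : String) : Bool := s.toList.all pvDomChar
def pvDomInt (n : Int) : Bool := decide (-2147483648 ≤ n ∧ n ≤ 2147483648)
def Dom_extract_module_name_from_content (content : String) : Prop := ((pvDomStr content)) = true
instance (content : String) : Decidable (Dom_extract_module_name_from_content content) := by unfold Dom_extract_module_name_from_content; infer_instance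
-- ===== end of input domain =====

-- B replaces A's four sequential scans (each with an early return) by a single pass that
-- collects the first candidate of each category, then picks by priority (alternative decomposition, same cost).

-- ===== PORT A =====
-- loops 1 and 3: first stripped line starting with `pre` ("= " / "== ") and longer than k; returns line[k:].strip()
def pvAScanPrefix (pre : List Char) (k : Nat) : List (List Char) → Option (List Char)
  | [] => none
  | l :: rest =>
    let s := PySem.Chars.strip l
    if PySem.Chars.startswith s pre && decide (k < s.length) then
      some (PySem.Chars.strip (PySem.List.slice s (some (k : Int)) none))
    else pvAScanPrefix pre k rest

-- loops 2 and 4: first i < len-1 with stripped line and stripped lines[i+1] nonempty and lines[i+1] all c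
def pvAScanUnder (c : Char) : List (List Char) → Option (List Char)
  | l :: next :: rest =>
    let s := PySem.Chars.strip l
    let ns := PySem.Chars.strip next
    if !s.isEmpty && !ns.isEmpty && ns.all (· == c) then some s
    else pvAScanUnder c (next :: rest)
  | _ => none

def extract_module_name_from_content (content : String) : String :=
  let lines := PySem.Chars.splitOn content.toList ['\n']
  match pvAScanPrefix ['=', ' '] 2 lines with
  | some r => String.ofList r
  | none =>
    match pvAScanUnder '=' lines with
    | some r => String.ofList r
    | none =>
      match pvAScanPrefix ['=', '=', ' '] 3 lines with
      | some r => String.ofList r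
      | none =>
        match pvAScanUnder '-' lines with
        | some r => String.ofList r
        | none => ""

-- ===== PORT B =====
-- single pass over the lines, keeping the first candidate of each of the four header categories
def pvBLoop :
    List (List Char) →
    Option (List Char) × Option (List Char) × Option (List Char) × Option (List Char) →
    Option (List Char) × Option (List Char) × Option (List Char) × Option (List Char)
  | [], st => st
  | raw :: rest, (c1, c2, c3, c4) =>
    let s := PySem.Chars.strip raw
    let c1' := if c1.isNone && PySem.Chars.startswith s ['=', ' '] && decide (2 < s.length) then
        some (PySem.Chars.strip (PySem.List.slice s (some (2 : Int)) none)) else c1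
    let c3' := if c3.isNone && PySem.Chars.startswith s ['=', '=', ' '] && decide (3 < s.length) then
        some (PySem.Chars.strip (PySem.List.slice s (some (3 : Int)) none)) else c3
    match rest with
    | [] => pvBLoop rest (c1', c2, c3', c4)
    | nxtraw :: _ =>
      let ns := PySem.Chars.strip nxtraw
      let c2' := if c2.isNone && !s.isEmpty && !ns.isEmpty && ns.all (· == '=') then some s else c2
      let c4' := if c4.isNone && !s.isEmpty && !ns.isEmpty && ns.all (· == '-') then some s else c4
      pvBLoop rest (c1', c2', c3', c4')

def extract_module_name_from_content_alt (content : String) : String :=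
  let lines := PySem.Chars.splitOn content.toList ['\n']
  let (c1, c2, c3, c4) := pvBLoop lines (none, none, none, none)
  String.ofList ((c1.or (c2.or (c3.or c4))).getD [])

-- ===== PRECONDITION & SPEC =====
def Spec_extract_module_name_from_content (content : String) (out : String) : Prop := out = extract_module_name_from_content_alt content
instance (content : String) (out : String) : Decidable (Spec_extract_module_name_from_content content out) := by unfold Spec_extract_module_name_from_content; infer_instance

-- ===== CLAIM (what is proved, stated in full; the proofs are below) =====
def Claim_equal_extract_module_name_from_content : Prop := ∀ (content : String), Dom_extract_module_name_from_content content → Spec_extract_module_name_from_content content (extract_module_name_from_content content)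

-- ===== LEMMAS AND PROOFS =====

-- one-step unfoldings of pvBLoop (definitional; stated to keep the induction goals readable)
theorem pvBLoop_single (raw : List Char) (c1 c2 c3 c4 : Option (List Char)) :
    pvBLoop [raw] (c1, c2, c3, c4) =
      ((if c1.isNone && PySem.Chars.startswith (PySem.Chars.strip raw) ['=', ' '] &&
            decide (2 < (PySem.Chars.strip raw).length) then
          some (PySem.Chars.strip (PySem.List.slice (PySem.Chars.strip raw) (some (2 : Int)) none)) else c1),
       c2,
       (if c3.isNone && PySem.Chars.startswith (PySem.Chars.strip raw) ['=', '=', ' '] &&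
            decide (3 < (PySem.Chars.strip raw).length) then
          some (PySem.Chars.strip (PySem.List.slice (PySem.Chars.strip raw) (some (3 : Int)) none)) else c3),
       c4) := rfl

theorem pvBLoop_cons_cons (raw nxtraw : List Char) (rest' : List (List Char))
    (c1 c2 c3 c4 : Option (List Char)) :
    pvBLoop (raw :: nxtraw :: rest') (c1, c2, c3, c4) =
      pvBLoop (nxtraw :: rest')
        ((if c1.isNone && PySem.Chars.startswith (PySem.Chars.strip raw) ['=', ' '] &&
              decide (2 < (PySem.Chars.strip raw).length) then
            some (PySem.Chars.strip (PySem.List.slice (PySem.Chars.strip raw) (some (2 : Int)) none)) else c1),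
         (if c2.isNone && !(PySem.Chars.strip raw).isEmpty && !(PySem.Chars.strip nxtraw).isEmpty &&
              (PySem.Chars.strip nxtraw).all (· == '=') then some (PySem.Chars.strip raw) else c2),
         (if c3.isNone && PySem.Chars.startswith (PySem.Chars.strip raw) ['=', '=', ' '] &&
              decide (3 < (PySem.Chars.strip raw).length) then
            some (PySem.Chars.strip (PySem.List.slice (PySem.Chars.strip raw) (some (3 : Int)) none)) else c3),
         (if c4.isNone && !(PySem.Chars.strip raw).isEmpty && !(PySem.Chars.strip nxtraw).isEmpty &&
              (PySem.Chars.strip nxtraw).all (· == '-') then some (PySem.Chars.strip raw) else c4)) := rfl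

-- the fold computes, per category, the stored candidate or else the first match A's scan of that category finds
theorem pvBLoop_spec (l : List (List Char)) (c1 c2 c3 c4 : Option (List Char)) :
    pvBLoop l (c1, c2, c3, c4) =
      (c1.or (pvAScanPrefix ['=', ' '] 2 l),
       c2.or (pvAScanUnder '=' l),
       c3.or (pvAScanPrefix ['=', '=', ' '] 3 l),
       c4.or (pvAScanUnder '-' l)) := by
  induction l generalizing c1 c2 c3 c4 with
  | nil => simp [pvBLoop, pvAScanPrefix, pvAScanUnder]
  | cons raw rest ih =>
    cases rest with
    | nil =>
      rw [pvBLoop_single]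
      refine Prod.ext ?_ (Prod.ext ?_ (Prod.ext ?_ ?_)) <;>
        simp only [pvAScanPrefix, pvAScanUnder]
      · cases c1 with
        | some a => simp
        | none => simp only [Option.isNone_none, Bool.true_and, Option.none_or]
                  split <;> simp
      · simp
      · cases c3 with
        | some a => simp
        | none => simp only [Option.isNone_none, Bool.true_and, Option.none_or]
                  split <;> simp
      · simp
    | cons nxtraw rest' =>
      rw [pvBLoop_cons_cons, ih]
      refine Prod.ext ?_ (Prod.ext ?_ (Prod.ext ?_ ?_)) <;>
        simp only [pvAScanPrefix, pvAScanUnder]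
      · cases c1 with
        | some a => simp
        | none => simp only [Option.isNone_none, Bool.true_and, Option.none_or]
                  split <;> simp
      · cases c2 with
        | some a => simp
        | none => simp only [Option.isNone_none, Bool.true_and, Option.none_or]
                  split <;> simp
      · cases c3 with
        | some a => simp
        | none => simp only [Option.isNone_none, Bool.true_and, Option.none_or]
                  split <;> simp
      · cases c4 with
        | some a => simp
        | none => simp only [Option.isNone_none, Bool.true_and, Option.none_or]
                  split <;> simp

-- ===== VERDICT (by name: the statement is the Claim_ definition above) =====
theorem extract_module_name_from_content_spec : Claim_equal_extract_module_name_from_content := by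
  intro content _
  unfold Spec_extract_module_name_from_content
  unfold extract_module_name_from_content extract_module_name_from_content_alt
  simp only [pvBLoop_spec, Option.none_or]
  cases pvAScanPrefix ['=', ' '] 2 (PySem.Chars.splitOn content.toList ['\n']) <;>
    cases pvAScanUnder '=' (PySem.Chars.splitOn content.toList ['\n']) <;>
    cases pvAScanPrefix ['=', '=', ' '] 3 (PySem.Chars.splitOn content.toList ['\n']) <;>
    cases pvAScanUnder '-' (PySem.Chars.splitOn content.toList ['\n']) <;> rfl
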